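-- pv_equiv track=rewrite | github.com/YifeiLi99/GPT-SoVITS-Playground-CN | gradio_eval.py | _segments_by_punc
-- ===== SOURCE A (Python) =====
-- def _segments_by_punc(s: str, punc: str) -> list[int]:
--     buf = 0
--     arr = []
--     for ch in s or "":
--         if ch in punc:
--             arr.append(buf)
--             buf = 0
--         else:
--             buf += 1
--     arr.append(buf)
--     return arr
-- ===== SOURCE B (Python) =====
-- def _segments_by_punc(s: str, punc: str) -> list[int]:
--     s = s or ""
--     bounds = [-1] + [i for i, ch in enumerate(s) if ch in punc] + [len(s)]
--     return [b - a - 1 for a, b in zip(bounds, bounds[1:])]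
-- ===== Notes on version B (the rewrite author's own statement) =====
-- stated objective: alternative
-- what changed: B finds the punctuation indices in one enumerate pass and derives the segment lengths by pairwise subtraction over [-1]+positions+[len(s)], instead of A's running counter flushed at each punctuation character.
import Mathlib
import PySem

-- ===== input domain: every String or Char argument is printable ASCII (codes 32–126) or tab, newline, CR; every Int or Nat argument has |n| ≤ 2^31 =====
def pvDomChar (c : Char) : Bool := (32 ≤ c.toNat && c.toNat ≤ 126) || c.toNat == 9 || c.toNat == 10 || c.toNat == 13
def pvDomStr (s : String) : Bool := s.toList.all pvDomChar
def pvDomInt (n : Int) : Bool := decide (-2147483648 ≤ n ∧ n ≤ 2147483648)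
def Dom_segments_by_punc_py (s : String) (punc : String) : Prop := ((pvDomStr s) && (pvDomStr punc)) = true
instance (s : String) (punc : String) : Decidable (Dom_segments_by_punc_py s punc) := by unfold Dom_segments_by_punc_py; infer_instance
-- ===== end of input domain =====

-- B computes the punctuation positions once and derives the run lengths by pairwise
-- subtraction over [-1] ++ positions ++ [len s], instead of A's running counter (alternative decomposition).

-- ===== PORT A =====
-- transliteration of A: running counter `buf`, flushed into `arr` at each punctuation char
def segments_by_punc_py (s : String) (punc : String) : List Int :=
  let r := s.toList.foldl
    (fun (st : Int × List Int) ch =>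
      if punc.toList.contains ch then (0, st.2 ++ [st.1]) else (st.1 + 1, st.2))
    (0, [])
  r.2 ++ [r.1]

-- ===== PORT B =====
-- transliteration of Source B: bounds = [-1] + punctuation indices + [len(s)]; gaps by zip subtraction
def segments_by_punc_py_alt (s : String) (punc : String) : List Int :=
  let bounds : List Int :=
    [-1] ++ ((PySem.List.enumerate s.toList 0).filter (fun p => punc.toList.contains p.2)).map (·.1)
         ++ [(s.toList.length : Int)]
  (bounds.zip (PySem.List.slice bounds (some 1) none)).map (fun q => q.2 - q.1 - 1)

-- ===== PRECONDITION & SPEC =====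
def Spec_segments_by_punc_py (s : String) (punc : String) (out : List Int) : Prop := out = segments_by_punc_py_alt s punc
instance (s : String) (punc : String) (out : List Int) : Decidable (Spec_segments_by_punc_py s punc out) := by unfold Spec_segments_by_punc_py; infer_instance

-- ===== CLAIM (what is proved, stated in full; the proofs are below) =====
def Claim_equal_segments_by_punc_py : Prop := ∀ (s : String) (punc : String), Dom_segments_by_punc_py s punc → Spec_segments_by_punc_py s punc (segments_by_punc_py s punc)

-- ===== LEMMAS AND PROOFS =====

-- reference segmentation: the list of gap lengths, head-first
def pvGoRef (p : Char → Bool) : List Char → Int → List Int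
  | [], buf => [buf]
  | c :: cs, buf => if p c then buf :: pvGoRef p cs 0 else pvGoRef p cs (buf + 1)

-- pairwise differences minus one (the zip expression of port B)
def pvDiffs (l : List Int) : List Int := (l.zip l.tail).map (fun q => q.2 - q.1 - 1)

theorem pvDiffs_cons (a b : Int) (t : List Int) :
    pvDiffs (a :: b :: t) = (b - a - 1) :: pvDiffs (b :: t) := by
  simp [pvDiffs]

theorem pvFoldA (p : Char → Bool) :
    ∀ (cs : List Char) (buf : Int) (arr : List Int),
      (cs.foldl (fun (st : Int × List Int) ch =>
          if p ch then (0, st.2 ++ [st.1]) else (st.1 + 1, st.2)) (buf, arr)).2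
        ++ [(cs.foldl (fun (st : Int × List Int) ch =>
          if p ch then (0, st.2 ++ [st.1]) else (st.1 + 1, st.2)) (buf, arr)).1]
      = arr ++ pvGoRef p cs buf := by
  intro cs
  induction cs with
  | nil => intro buf arr; simp [pvGoRef]
  | cons c cs ih =>
    intro buf arr
    by_cases h : p c
    · simp [List.foldl_cons, h, ih, pvGoRef]
    · simp [List.foldl_cons, h, ih, pvGoRef]

theorem pvGaps (p : Char → Bool) :
    ∀ (cs : List Char) (i prev : Int),
      pvDiffs (prev :: (((PySem.List.enumerate cs i).filter (fun q => p q.2)).map (·.1)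
                    ++ [i + (cs.length : Int)]))
      = pvGoRef p cs (i - prev - 1) := by
  intro cs
  induction cs with
  | nil => intro i prev; simp [PySem.List.enumerate, pvDiffs, pvGoRef]
  | cons c cs ih =>
    intro i prev
    rw [PySem.List.enumerate_cons]
    by_cases h : p c
    · simp only [List.filter_cons, h, if_pos, List.map_cons, List.cons_append,
        List.length_cons]
      rw [pvDiffs_cons]
      push_cast
      rw [show i + ((cs.length : Int) + 1) = (i + 1) + (cs.length : Int) by ring,
        ih (i + 1) i]
      simp only [pvGoRef, h, if_pos]
      norm_num
    · simp only [List.filter_cons, h, Bool.false_eq_true, if_false,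
        List.length_cons]
      push_cast
      rw [show i + ((cs.length : Int) + 1) = (i + 1) + (cs.length : Int) by ring,
        ih (i + 1) prev]
      simp only [pvGoRef, h, Bool.false_eq_true, if_false]
      congr 1
      ring

-- ===== VERDICT (by name: the statement is the Claim_ definition above) =====
theorem segments_by_punc_py_spec : Claim_equal_segments_by_punc_py := by
  intro s punc _
  show segments_by_punc_py s punc = segments_by_punc_py_alt s punc
  unfold segments_by_punc_py segments_by_punc_py_alt
  rw [pvFoldA (fun ch => punc.toList.contains ch) s.toList 0 []]
  have h := pvGaps (fun ch => punc.toList.contains ch) s.toList 0 (-1)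
  rw [show (0 : Int) - (-1) - 1 = 0 by ring] at h
  simp only [zero_add] at h
  simp only [pvDiffs, List.tail_cons] at h
  simp only [PySem.List.slice_from_one, List.nil_append]
  exact h.symm
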